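-- pv_equiv track=rewrite | github.com/teaguetomesh/dqva-and-circuit-cutting | uniter_prob.py | find_cluster_O_qubit_positions
-- ===== SOURCE A (Python) =====
-- def find_cluster_O_qubit_positions(O_rho_pairs, cluster_circs):
--     cluster_O_qubit_positions = {}
--     for pair in O_rho_pairs:
--         O_qubit, _ = pair
--         cluster_idx, O_qubit_idx = O_qubit
--         if cluster_idx not in cluster_O_qubit_positions:
--             cluster_O_qubit_positions[cluster_idx] = [O_qubit_idx]
--         else:
--             cluster_O_qubit_positions[cluster_idx].append(O_qubit_idx)
--     for cluster_idx in range(len(cluster_circs)):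
--         if cluster_idx not in cluster_O_qubit_positions:
--             cluster_O_qubit_positions[cluster_idx] = []
--     return cluster_O_qubit_positions
-- ===== SOURCE B (Python) =====
-- def find_cluster_O_qubit_positions(O_rho_pairs, cluster_circs):
--     # Distinct cluster indices in encounter order, then any remaining range indices.
--     seen = dict.fromkeys(cluster for (cluster, _), _ in O_rho_pairs)
--     keys = list(seen) + [i for i in range(len(cluster_circs)) if i not in seen]
--     return {k: [q for (c, q), _ in O_rho_pairs if c == k] for k in keys}
-- ===== Notes on version B (the rewrite author's own statement) =====
-- stated objective: simpler
-- what changed: Replaces A's incremental hash-bucket accumulation with computing the key list once (distinct cluster indices plus missing range indices) and building the whole dict in one comprehension that gathers each cluster's positions with a per-key scan.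
import Mathlib
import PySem

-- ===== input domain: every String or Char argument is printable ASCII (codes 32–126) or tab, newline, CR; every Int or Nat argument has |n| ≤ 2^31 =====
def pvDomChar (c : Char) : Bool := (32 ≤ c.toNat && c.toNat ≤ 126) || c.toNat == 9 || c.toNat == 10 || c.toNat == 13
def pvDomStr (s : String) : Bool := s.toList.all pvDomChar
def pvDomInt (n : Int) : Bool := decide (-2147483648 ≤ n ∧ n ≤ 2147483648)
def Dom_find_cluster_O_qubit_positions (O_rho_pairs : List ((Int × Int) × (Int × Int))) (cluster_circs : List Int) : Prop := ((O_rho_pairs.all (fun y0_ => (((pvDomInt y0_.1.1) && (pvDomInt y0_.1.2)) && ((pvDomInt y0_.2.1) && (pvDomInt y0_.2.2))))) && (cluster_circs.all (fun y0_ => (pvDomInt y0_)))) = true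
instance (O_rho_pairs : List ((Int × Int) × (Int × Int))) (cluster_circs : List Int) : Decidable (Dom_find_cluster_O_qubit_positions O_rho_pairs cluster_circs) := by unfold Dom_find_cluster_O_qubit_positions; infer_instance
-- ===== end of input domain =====

-- B is simpler: it computes the key order once and gathers each cluster's positions with one comprehension per key, instead of A's incremental bucket accumulation.

-- ===== PORT A =====
def find_cluster_O_qubit_positions (O_rho_pairs : List ((Int × Int) × (Int × Int))) (cluster_circs : List Int) : List (Int × List Int) :=
  let d : PySem.Dict Int (List Int) :=
    O_rho_pairs.foldl (fun d pair =>
      let O_qubit := pair.1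
      let cluster_idx := O_qubit.1
      let O_qubit_idx := O_qubit.2
      if !(d.contains cluster_idx) then
        d.insert cluster_idx [O_qubit_idx]
      else
        d.modify cluster_idx [] (fun l => l ++ [O_qubit_idx])) PySem.Dict.empty
  let d :=
    (PySem.List.pyRange 0 (cluster_circs.length : Int) 1).foldl (fun d cluster_idx =>
      if !(d.contains cluster_idx) then d.insert cluster_idx [] else d) d
  d.items

-- ===== PORT B =====
def find_cluster_O_qubit_positions_alt (O_rho_pairs : List ((Int × Int) × (Int × Int))) (cluster_circs : List Int) : List (Int × List Int) :=
  let seen := PySem.List.dedup (O_rho_pairs.map (fun p => p.1.1))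
  let keys := seen ++ (PySem.List.pyRange 0 (cluster_circs.length : Int) 1).filter
    (fun i => !(seen.contains i))
  keys.map (fun k => (k, (O_rho_pairs.filter (fun p => p.1.1 == k)).map (fun p => p.1.2)))

-- ===== PRECONDITION & SPEC =====
def Spec_find_cluster_O_qubit_positions (O_rho_pairs : List ((Int × Int) × (Int × Int))) (cluster_circs : List Int) (out : List (Int × List Int)) : Prop := out = find_cluster_O_qubit_positions_alt O_rho_pairs cluster_circs
instance (O_rho_pairs : List ((Int × Int) × (Int × Int))) (cluster_circs : List Int) (out : List (Int × List Int)) : Decidable (Spec_find_cluster_O_qubit_positions O_rho_pairs cluster_circs out) := by unfold Spec_find_cluster_O_qubit_positions; infer_instance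

-- ===== CLAIM =====
def Claim_equal_find_cluster_O_qubit_positions : Prop := ∀ (O_rho_pairs : List ((Int × Int) × (Int × Int))) (cluster_circs : List Int), Dom_find_cluster_O_qubit_positions O_rho_pairs cluster_circs → Spec_find_cluster_O_qubit_positions O_rho_pairs cluster_circs (find_cluster_O_qubit_positions O_rho_pairs cluster_circs)

-- ===== LEMMAS AND PROOFS =====

-- A's insert/append branch is exactly Dict.modify
lemma branch_eq_modify (d : PySem.Dict Int (List Int)) (k v : Int) :
    (if !(d.contains k) then d.insert k [v] else d.modify k [] (fun l => l ++ [v]))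
      = d.modify k [] (fun l => l ++ [v]) := by
  by_cases h : d.contains k
  · simp [h]
  · have hne : d.contains k = false := by simpa using h
    simp [hne, PySem.Dict.modify, PySem.Dict.getD_of_not_contains _ _ hne]

-- A's fill loop appends (i, []) for every missing i of a Nodup list
lemma fill_items (r : List Int) (hr : r.Nodup) (d : PySem.Dict Int (List Int)) :
    ((r.foldl (fun d i => if !(d.contains i) then d.insert i [] else d) d).items)
      = d.items ++ (r.filter (fun i => !(d.contains i))).map (fun i => (i, ([] : List Int))) := by
  induction r generalizing d with
  | nil => simp
  | cons i t ih =>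
    have hnd := hr
    simp only [List.nodup_cons] at hnd
    simp only [List.foldl_cons, List.filter_cons]
    by_cases h : d.contains i
    · simp only [h, Bool.not_true, Bool.false_eq_true, if_false]
      simpa using ih hnd.2 d
    · have hne : (d.contains i) = false := by simpa using h
      simp only [hne, Bool.not_false, if_true]
      rw [ih hnd.2 (d.insert i []), PySem.Dict.items_insert_of_not_contains _ _ hne]
      have hfil : t.filter (fun j => !((d.insert i []).contains j))
          = t.filter (fun j => !(d.contains j)) := by
        apply List.filter_congr
        intro j hj
        have hji : j ≠ i := fun hcontra => hnd.1 (hcontra ▸ hj)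
        simp [PySem.Dict.contains_insert, hji]
      rw [hfil]
      simp

-- ===== VERDICT =====
theorem find_cluster_O_qubit_positions_spec : Claim_equal_find_cluster_O_qubit_positions := by
  intro pairs cc _
  unfold Spec_find_cluster_O_qubit_positions
  unfold find_cluster_O_qubit_positions find_cluster_O_qubit_positions_alt
  -- A's first loop: rewrite the branch to a uniform modify, then to a fold over (key, value) pairs
  have hbr : (fun (d : PySem.Dict Int (List Int)) (pair : (Int × Int) × (Int × Int)) =>
        if !(d.contains pair.1.1) then d.insert pair.1.1 [pair.1.2]
        else d.modify pair.1.1 [] (fun l => l ++ [pair.1.2]))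
      = (fun d pair => d.modify pair.1.1 [] (fun l => l ++ [pair.1.2])) := by
    funext d pair
    exact branch_eq_modify d pair.1.1 pair.1.2
  rw [hbr]
  set l := pairs.map (fun p => (p.1.1, p.1.2)) with hl
  have hfold : pairs.foldl (fun d pair => d.modify pair.1.1 [] (fun l => l ++ [pair.1.2]))
        PySem.Dict.empty
      = l.foldl (fun d q => d.modify q.1 [] (fun l => l ++ [q.2])) PySem.Dict.empty := by
    rw [hl, List.foldl_map]
  rw [hfold]
  set d1 := l.foldl (fun d q => d.modify q.1 [] (fun l => l ++ [q.2])) PySem.Dict.empty with hd1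
  set seen := PySem.List.dedup (pairs.map (fun p => p.1.1)) with hseen
  have hkeys : d1.keys = seen := by
    rw [hd1, PySem.Dict.keys_foldl_modify_key]
    simp [hseen, hl, PySem.Set.update, PySem.Set.ofList_eq_foldl]
    rfl
  have hnodup : d1.keys.Nodup := by rw [hkeys, hseen]; exact PySem.List.nodup_dedup _
  have hgetD : ∀ c : Int, d1.getD c []
      = (pairs.filter (fun p => p.1.1 == c)).map (fun p => p.1.2) := by
    intro c
    rw [hd1, PySem.Dict.getD_foldl_modify_append]
    simp [hl, List.filter_map]
    rfl
  have hcont : ∀ i : Int, d1.contains i = seen.contains i := by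
    intro i
    rw [PySem.Dict.contains_eq_decide_mem_keys, hkeys]
    simp
  rw [fill_items _ (PySem.List.nodup_pyRange_one _ _) d1]
  rw [List.map_append]
  congr 1
  · -- items of d1 = seen.map (k, gather k)
    rw [PySem.Dict.items_eq_map_keys d1 hnodup [], hkeys]
    apply List.map_congr_left
    intro k _
    rw [hgetD k]
  · -- fill part: for missing i, the gather is empty
    have hpred : (fun i => !(d1.contains i)) = (fun i => !(seen.contains i)) := by
      funext i; rw [hcont i]
    rw [hpred]
    apply List.map_congr_left
    intro i hi
    have hmem : i ∉ pairs.map (fun p => p.1.1) := by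
      have := (List.mem_filter.mp hi).2
      simp only [Bool.not_eq_true'] at this
      intro hmem
      have : i ∈ seen := by rw [hseen]; exact (PySem.List.mem_dedup _ _).mpr hmem
      simp_all
    have hfil : pairs.filter (fun p => p.1.1 == i) = [] := by
      apply List.filter_eq_nil_iff.mpr
      intro p hp
      simp only [beq_iff_eq]
      intro he
      exact hmem (he ▸ List.mem_map_of_mem hp)
    rw [hfil]
    rfl
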